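-- pv_equiv track=rewrite | github.com/lolmomarchal/Alignment-CSE185-SP24- | src/seed_and_extend.py | calculate_md_tag
-- ===== SOURCE A (Python) =====
-- def calculate_md_tag(aligned_query: str, aligned_ref: str) -> str:
--     """Calculate the MD tag for the SAM file, the string encoding
--     the mismatched and deleted reference bases.
--
--     Args:
--         aligned_query (str): The aligned query sequence.
--         aligned_ref (str): The aligned reference sequence.
--
--     Returns:
--         str: The MD tag for the SAM file.
--     """
--     md_tag: str = ""
--     matches: int = 0
--     for q, r in zip(aligned_query, aligned_ref):
--         if q == r:
--             matches += 1
--         else: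
--             if matches > 0:
--                 md_tag += str(matches)
--             md_tag += r
--             matches = 0
--     if matches > 0:
--         md_tag += str(matches)
--     return md_tag
-- ===== SOURCE B (Python) =====
-- def calculate_md_tag(aligned_query: str, aligned_ref: str) -> str:
--     """Run-length formulation: group the aligned pairs into maximal runs of
--     matches / mismatches, emit the run length for matches and the reference
--     bases for mismatches, and join the pieces."""
--     pairs = list(zip(aligned_query, aligned_ref))
--     n = len(pairs)
--     pieces = []
--     i = 0
--     while i < n:
--         is_match = pairs[i][0] == pairs[i][1]
--         j = i
--         while j < n and (pairs[j][0] == pairs[j][1]) == is_match: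
--             j += 1
--         if is_match:
--             pieces.append(str(j - i))
--         else:
--             pieces.append("".join(r for _, r in pairs[i:j]))
--         i = j
--     return "".join(pieces)
-- ===== Notes on version B (the rewrite author's own statement) =====
-- stated objective: alternative
-- what changed: Replaces the running match-counter state machine with a run-length grouping traversal: the zipped pairs are partitioned into maximal match/mismatch runs and each run is rendered as one piece (length for matches, reference bases for mismatches), then joined.
import Mathlib
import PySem

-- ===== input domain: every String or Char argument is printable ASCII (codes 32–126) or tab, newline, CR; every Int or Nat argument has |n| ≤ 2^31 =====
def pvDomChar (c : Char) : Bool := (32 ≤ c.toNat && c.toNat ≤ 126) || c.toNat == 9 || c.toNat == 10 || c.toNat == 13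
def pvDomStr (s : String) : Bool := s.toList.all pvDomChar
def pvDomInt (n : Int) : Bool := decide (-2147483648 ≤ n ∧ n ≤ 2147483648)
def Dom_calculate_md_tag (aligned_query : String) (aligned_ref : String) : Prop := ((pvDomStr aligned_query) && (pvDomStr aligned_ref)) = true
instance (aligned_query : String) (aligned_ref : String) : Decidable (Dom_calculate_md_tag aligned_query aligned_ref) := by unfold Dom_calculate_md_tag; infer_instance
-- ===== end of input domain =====

-- B replaces A's running match-counter state machine by a run-length grouping traversal
-- (maximal match/mismatch runs, rendered as pieces and joined); same value, alternative structure.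

-- ===== PORT A =====
def calculate_md_tag (aligned_query : String) (aligned_ref : String) : String :=
  let res := (aligned_query.toList.zip aligned_ref.toList).foldl
    (fun (st : String × Int) p =>
      if p.1 == p.2 then (st.1, st.2 + 1)
      else ((st.1 ++ (if st.2 > 0 then PySem.Int.toStr st.2 else "")) ++ p.2.toString, 0))
    ("", 0)
  res.1 ++ (if res.2 > 0 then PySem.Int.toStr res.2 else "")

-- ===== PORT B =====
-- maximal runs of the zipped pairs, keyed by whether query char = ref char
-- (the inner 'while j < n' advance is List.span on the remaining pairs)
def mdRuns : List (Char × Char) → List (Bool × List (Char × Char))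
  | [] => []
  | p :: rest =>
    let k := p.1 == p.2
    let s := rest.span (fun x => (x.1 == x.2) == k)
    (k, p :: s.1) :: mdRuns s.2
termination_by l => l.length
decreasing_by
  simp only [List.span_eq_takeWhile_dropWhile]
  exact Nat.lt_succ_of_le (List.length_dropWhile_le _ _)

def mdPiece (g : Bool × List (Char × Char)) : String :=
  if g.1 then PySem.Int.toStr (g.2.length : Int)
  else String.ofList (g.2.map (·.2))

def calculate_md_tag_alt (aligned_query : String) (aligned_ref : String) : String :=
  String.join ((mdRuns (aligned_query.toList.zip aligned_ref.toList)).map mdPiece)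

-- ===== PRECONDITION & SPEC =====
def Spec_calculate_md_tag (aligned_query : String) (aligned_ref : String) (out : String) : Prop := out = calculate_md_tag_alt aligned_query aligned_ref
instance (aligned_query : String) (aligned_ref : String) (out : String) : Decidable (Spec_calculate_md_tag aligned_query aligned_ref out) := by unfold Spec_calculate_md_tag; infer_instance

-- ===== CLAIM (what is proved, stated in full; the proofs are below) =====
def Claim_equal_calculate_md_tag : Prop := ∀ (aligned_query : String) (aligned_ref : String), Dom_calculate_md_tag aligned_query aligned_ref → Spec_calculate_md_tag aligned_query aligned_ref (calculate_md_tag aligned_query aligned_ref)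

-- ===== LEMMAS AND PROOFS =====

/-- `str(matches)` guarded by `matches > 0`. -/
def mdPrefix (m : Int) : String := if m > 0 then PySem.Int.toStr m else ""

/-- What A's loop produces from pending-match count `m` on the remaining pairs. -/
def mdA : Int → List (Char × Char) → String
  | m, [] => mdPrefix m
  | m, p :: t => if p.1 == p.2 then mdA (m + 1) t else (mdPrefix m ++ p.2.toString) ++ mdA 0 t

lemma md_join_cons (a : String) (L : List String) :
    String.join (a :: L) = a ++ String.join L := by
  apply String.toList_injective
  simp [String.toList_join]

lemma mdA_foldl (l : List (Char × Char)) : ∀ (s : String) (m : Int),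
    (let res := l.foldl
      (fun (st : String × Int) p =>
        if p.1 == p.2 then (st.1, st.2 + 1)
        else ((st.1 ++ (if st.2 > 0 then PySem.Int.toStr st.2 else "")) ++ p.2.toString, 0))
      (s, m)
     res.1 ++ (if res.2 > 0 then PySem.Int.toStr res.2 else "")) = s ++ mdA m l := by
  induction l with
  | nil => intro s m; simp [mdA, mdPrefix]
  | cons p t ih =>
    intro s m
    by_cases h : p.1 == p.2
    · simp only [List.foldl_cons, h, if_pos, mdA]
      rw [ih]
    · simp only [List.foldl_cons, h, Bool.false_eq_true, if_false, mdA]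
      rw [ih]
      apply String.toList_injective
      simp [mdPrefix]
  
lemma mdA_matches (run : List (Char × Char)) : ∀ (rest : List (Char × Char)) (m : Int),
    (∀ p ∈ run, p.1 = p.2) → mdA m (run ++ rest) = mdA (m + run.length) rest := by
  induction run with
  | nil => intro rest m _; simp
  | cons p t ih =>
    intro rest m h
    have hp : p.1 = p.2 := h p (by simp)
    simp only [List.cons_append, mdA, hp, beq_self_eq_true, if_pos]
    rw [ih rest (m + 1) (fun q hq => h q (by simp [hq]))]
    congr 1
    simp only [List.length_cons]
    push_cast
    ring

lemma mdA_mismatches (run : List (Char × Char)) : ∀ (rest : List (Char × Char)),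
    (∀ p ∈ run, p.1 ≠ p.2) → mdA 0 (run ++ rest) = String.ofList (run.map (·.2)) ++ mdA 0 rest := by
  induction run with
  | nil =>
    intro rest _
    apply String.toList_injective
    simp
  | cons p t ih =>
    intro rest h
    have hp : ¬ (p.1 == p.2) := by simpa using h p (by simp)
    simp only [List.cons_append, mdA, hp, Bool.false_eq_true, if_false, mdPrefix]
    rw [ih rest (fun q hq => h q (by simp [hq]))]
    apply String.toList_injective
    simp

lemma mdA_boundary (rest : List (Char × Char)) (m : Int)
    (h : rest = [] ∨ ∃ p t, rest = p :: t ∧ p.1 ≠ p.2) :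
    mdA m rest = mdPrefix m ++ mdA 0 rest := by
  rcases h with h | ⟨p, t, rfl, hp⟩
  · subst h
    apply String.toList_injective
    simp [mdA, mdPrefix]
  · have hp' : ¬ (p.1 == p.2) := by simpa using hp
    simp only [mdA, hp', Bool.false_eq_true, if_false]
    apply String.toList_injective
    simp [mdPrefix]

lemma mdA_runs_aux : ∀ (n : Nat) (l : List (Char × Char)), l.length ≤ n →
    mdA 0 l = String.join ((mdRuns l).map mdPiece) := by
  intro n
  induction n with
  | zero =>
    intro l hl
    have : l = [] := List.eq_nil_of_length_eq_zero (Nat.le_zero.mp hl)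
    subst this
    simp [mdRuns, mdA, mdPrefix, String.join]
  | succ n ih =>
    intro l hl
    cases l with
    | nil => simp [mdRuns, mdA, mdPrefix, String.join]
    | cons p rest =>
      have hlen : rest.length ≤ n := by simpa using Nat.le_of_succ_le_succ (by simpa using hl)
      cases hpq : (p.1 == p.2) with
      | true =>
        rw [mdRuns]
        simp only [hpq, List.span_eq_takeWhile_dropWhile, List.map_cons, md_join_cons]
        have hrest : rest = rest.takeWhile (fun x => (x.1 == x.2) == true)
            ++ rest.dropWhile (fun x => (x.1 == x.2) == true) :=
          (List.takeWhile_append_dropWhile ..).symm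
        have hmatch : ∀ q ∈ p :: rest.takeWhile (fun x => (x.1 == x.2) == true), q.1 = q.2 := by
          intro q hq
          rcases List.mem_cons.mp hq with rfl | hq'
          · exact eq_of_beq hpq
          · exact eq_of_beq (by simpa using List.mem_takeWhile_imp hq')
        have hdwlen : (rest.dropWhile (fun x => (x.1 == x.2) == true)).length ≤ n :=
          le_trans (List.length_dropWhile_le _ _) hlen
        rw [← ih _ hdwlen]
        conv_lhs => rw [show p :: rest
            = (p :: rest.takeWhile (fun x => (x.1 == x.2) == true))
              ++ rest.dropWhile (fun x => (x.1 == x.2) == true) by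
          rw [List.cons_append, ← hrest]]
        rw [mdA_matches _ _ 0 hmatch, zero_add]
        rw [mdA_boundary _ _ ?_]
        · congr 1
          simp only [mdPiece, if_pos, mdPrefix]
          rw [if_pos (by exact_mod_cast List.length_pos_of_ne_nil (List.cons_ne_nil _ _))]
        · cases hdw2 : rest.dropWhile (fun x => (x.1 == x.2) == true) with
          | nil => exact Or.inl rfl
          | cons q t =>
            refine Or.inr ⟨q, t, rfl, ?_⟩
            have h0 := List.head?_dropWhile_not (fun x => (x.1 == x.2) == true) rest
            rw [hdw2] at h0
            simpa using h0
      | false =>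
        rw [mdRuns]
        simp only [hpq, List.span_eq_takeWhile_dropWhile, List.map_cons, md_join_cons]
        have hrest : rest = rest.takeWhile (fun x => (x.1 == x.2) == false)
            ++ rest.dropWhile (fun x => (x.1 == x.2) == false) :=
          (List.takeWhile_append_dropWhile ..).symm
        have hmis : ∀ q ∈ p :: rest.takeWhile (fun x => (x.1 == x.2) == false), q.1 ≠ q.2 := by
          intro q hq
          rcases List.mem_cons.mp hq with rfl | hq'
          · simpa using hpq
          · have h1 : (q.1 == q.2) = false := by simpa using List.mem_takeWhile_imp hq'
            simpa using h1
        have hdwlen : (rest.dropWhile (fun x => (x.1 == x.2) == false)).length ≤ n :=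
          le_trans (List.length_dropWhile_le _ _) hlen
        rw [← ih _ hdwlen]
        conv_lhs => rw [show p :: rest
            = (p :: rest.takeWhile (fun x => (x.1 == x.2) == false))
              ++ rest.dropWhile (fun x => (x.1 == x.2) == false) by
          rw [List.cons_append, ← hrest]]
        rw [mdA_mismatches _ _ hmis]
        congr 1

lemma mdA_runs (l : List (Char × Char)) :
    mdA 0 l = String.join ((mdRuns l).map mdPiece) :=
  mdA_runs_aux l.length l (le_refl _)

-- ===== VERDICT (by name: the statement is the Claim_ definition above) =====
theorem calculate_md_tag_spec : Claim_equal_calculate_md_tag := by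
  intro q r _
  show _ = _
  unfold calculate_md_tag calculate_md_tag_alt
  rw [mdA_foldl, ← mdA_runs]
  apply String.toList_injective
  simp
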